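-- pv_equiv track=rewrite | github.com/sishyanet/sishya-ml | ld.py | ld_int
-- ===== SOURCE A (Python) =====
-- from math import inf
--
-- def get_next_dist(idx, i, seq1, seq2):
--
--     distance = 0
--
--     if (i == len(seq2) - 1):
--         distance = -1
--     else:
--         #at the end of the reference, align all the coming queries to this end
--         if (idx == len(seq1) - 1):
--             i = i + 1
--             assert i < len(seq2)
--             distance = abs(seq1[idx] - seq2[i])
--         else:
--
--             curr_dist = []
--             min_dist = inf
--             min_idx = -1
--
--             curr_dist.append(abs(seq1[idx+1] - seq2[i+1]))
--             curr_dist.append(abs(seq1[idx] - seq2[i+1]))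
--             curr_dist.append(abs(seq1[idx+1] - seq2[i]))
--
--             for j in range(0, len(curr_dist)):
--                 if (curr_dist[j] < min_dist):
--                     min_dist = curr_dist[j]
--                     min_idx = j
--
--             if (min_idx == 0):
--                 idx,i = idx+1, i+1
--             elif (min_idx == 1):
--                 idx,i = idx, i+1
--             else:
--                 assert min_idx == 2
--                 idx,i = idx+1, i
--
--             distance = min_dist
--
--     return distance, idx, i
--
-- def calc_min_dist(idx, seq1, seq2, min_dist):
--
--     tot_dist = 0
--     i = 0
--
--     next_dist = abs(seq1[idx] - seq2[i])
--
--     while (next_dist >= 0):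
--
--         tot_dist = tot_dist + next_dist
--         next_dist, idx, i =  get_next_dist(idx, i, seq1, seq2)
--
--         #no need to traverse any more, this is not the best match
--         if (tot_dist > min_dist):
--             break
--
--     return tot_dist, idx
--
-- def ld_int(seq1, seq2):
--
--     min_dist = inf
--     start_idx, end_idx = 0,0
--
--     for i in range(0, len(seq1)):
--         curr_dist, end = calc_min_dist(i, seq1, seq2, min_dist)
--         if (curr_dist < min_dist):
--             min_dist = curr_dist
--             start_idx = i
--             end_idx = end
--
--     return start_idx, end_idx
-- ===== SOURCE B (Python) =====
-- from math import inf
--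
-- def ld_int(seq1, seq2):
--     n, m = len(seq1), len(seq2)
--     # Dynamic programming over the deterministic greedy states (idx, i):
--     # row[idx] = (remaining distance accumulated from state (idx, i) until the
--     #             walk terminates, final idx there).  Rows are computed for
--     #             i = m-1 down to 0; only row 0 is needed at the end.
--     row = []
--     for i in range(m - 1, -1, -1):
--         prev = row
--         cells = []  # descending idx order; cells[-1] is the cell for idx k+1
--         for k in range(n - 1, -1, -1):
--             if i == m - 1:
--                 cell = (0, k)
--             elif k == n - 1:
--                 d, f = prev[k]
--                 cell = (abs(seq1[k] - seq2[i + 1]) + d, f)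
--             else:
--                 a = abs(seq1[k + 1] - seq2[i + 1])
--                 b = abs(seq1[k] - seq2[i + 1])
--                 c = abs(seq1[k + 1] - seq2[i])
--                 if a <= b and a <= c:
--                     d, f = prev[k + 1]
--                     cell = (a + d, f)
--                 elif b < a and b <= c:
--                     d, f = prev[k]
--                     cell = (b + d, f)
--                 else:
--                     d, f = cells[-1]
--                     cell = (c + d, f)
--             cells.append(cell)
--         cells.reverse()
--         row = cells
--     best_dist = inf
--     start_idx, end_idx = 0, 0
--     for s in range(n):
--         d, f = row[s]
--         tot = abs(seq1[s] - seq2[0]) + d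
--         if tot < best_dist:
--             best_dist = tot
--             start_idx, end_idx = s, f
--     return start_idx, end_idx
-- ===== Notes on version B (the rewrite author's own statement) =====
-- stated objective: alternative
-- what changed: Replaces the per-start greedy walk (restarted from scratch for every start index) by a bottom-up dynamic program over the deterministic (idx,i) states: one table pass precomputes, for every state, the remaining distance and final idx of the greedy walk, so each start is then answered in O(1).
import Mathlib
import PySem

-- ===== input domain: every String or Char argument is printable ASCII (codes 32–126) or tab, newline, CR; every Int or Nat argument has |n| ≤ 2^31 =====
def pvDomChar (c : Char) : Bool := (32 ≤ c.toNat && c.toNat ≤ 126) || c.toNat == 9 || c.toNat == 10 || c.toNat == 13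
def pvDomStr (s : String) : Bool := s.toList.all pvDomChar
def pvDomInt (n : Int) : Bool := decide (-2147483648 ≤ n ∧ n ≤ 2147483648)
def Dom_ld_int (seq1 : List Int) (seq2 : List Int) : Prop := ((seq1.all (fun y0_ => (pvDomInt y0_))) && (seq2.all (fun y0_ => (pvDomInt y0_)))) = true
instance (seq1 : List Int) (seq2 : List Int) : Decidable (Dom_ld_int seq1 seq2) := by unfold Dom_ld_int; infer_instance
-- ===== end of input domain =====

-- B replaces A's per-start greedy walks by one bottom-up dynamic program over the
-- deterministic (idx, i) states: each state transition is evaluated once instead of once per start.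

-- ===== PORT A =====

-- Python's `math.inf` sentinel for min_dist: `none` plays inf.
-- mdLt md t  =  "t > min_dist";  mdGt md t  =  "t < min_dist"  (shared comparator helper).
def mdLt (md : Option Int) (t : Int) : Bool := match md with | none => false | some v => decide (v < t)
def mdGt (md : Option Int) (t : Int) : Bool := match md with | none => true | some v => decide (t < v)

def getNextDist (idx i : Nat) (seq1 seq2 : List Int) : Int × Nat × Nat :=
  if i = seq2.length - 1 then (-1, idx, i)
  else if idx = seq1.length - 1 then
    (|seq1.getD idx 0 - seq2.getD (i+1) 0|, idx, i+1)
  else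
    let a := |seq1.getD (idx+1) 0 - seq2.getD (i+1) 0|
    let b := |seq1.getD idx 0 - seq2.getD (i+1) 0|
    let c := |seq1.getD (idx+1) 0 - seq2.getD i 0|
    -- unrolled transliteration of the j = 0,1,2 first-strict-minimum scan over [a, b, c]
    let m1 : Int × Nat := if b < a then (b, 1) else (a, 0)
    let m2 : Int × Nat := if c < m1.1 then (c, 2) else m1
    if m2.2 = 0 then (m2.1, idx+1, i+1)
    else if m2.2 = 1 then (m2.1, idx, i+1)
    else (m2.1, idx+1, i)

-- the while loop of calc_min_dist; the fuel only makes it total (n+m+2 always suffices, see go_walk)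
def calcGo (seq1 seq2 : List Int) (md : Option Int) : Nat → Int → Int → Nat → Nat → Int × Nat
  | 0, tot, _, idx, _ => (tot, idx)
  | fuel+1, tot, nd, idx, i =>
    if nd < 0 then (tot, idx)
    else
      let tot' := tot + nd
      let r := getNextDist idx i seq1 seq2
      if mdLt md tot' then (tot', r.2.1)
      else calcGo seq1 seq2 md fuel tot' r.1 r.2.1 r.2.2

def calcMinDist (idx : Nat) (seq1 seq2 : List Int) (md : Option Int) : Int × Nat :=
  calcGo seq1 seq2 md (seq1.length + seq2.length + 2) 0 (|seq1.getD idx 0 - seq2.getD 0 0|) idx 0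

def ld_int (seq1 : List Int) (seq2 : List Int) : Int × Int :=
  let r := (List.range seq1.length).foldl
    (fun (st : Option Int × Nat × Nat) s =>
      let c := calcMinDist s seq1 seq2 st.1
      if mdGt st.1 c.1 then (some c.1, s, c.2) else st)
    (none, 0, 0)
  ((r.2.1 : Int), (r.2.2 : Int))

-- ===== PORT B =====

def altCell (seq1 seq2 : List Int) (prev acc : List (Int × Nat)) (i k : Nat) : Int × Nat :=
  if i = seq2.length - 1 then (0, k)
  else if k = seq1.length - 1 then
    let p := prev.getD k (0, 0)
    (|seq1.getD k 0 - seq2.getD (i+1) 0| + p.1, p.2)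
  else
    let a := |seq1.getD (k+1) 0 - seq2.getD (i+1) 0|
    let b := |seq1.getD k 0 - seq2.getD (i+1) 0|
    let c := |seq1.getD (k+1) 0 - seq2.getD i 0|
    if a ≤ b ∧ a ≤ c then let p := prev.getD (k+1) (0, 0); (a + p.1, p.2)
    else if b < a ∧ b ≤ c then let p := prev.getD k (0, 0); (b + p.1, p.2)
    else let p := acc.headD (0, 0); (c + p.1, p.2)

-- one row of Source B's table: idx descending, consing = append in descending order then reverse
def altRow (seq1 seq2 : List Int) (prev : List (Int × Nat)) (i : Nat) : List (Int × Nat) :=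
  ((List.range seq1.length).reverse).foldl (fun acc k => altCell seq1 seq2 prev acc i k :: acc) []

def ld_int_alt (seq1 : List Int) (seq2 : List Int) : Int × Int :=
  let row := ((List.range seq2.length).reverse).foldl (fun prev i => altRow seq1 seq2 prev i) []
  let r := (List.range seq1.length).foldl
    (fun (st : Option Int × Nat × Nat) s =>
      let c := row.getD s (0, 0)
      let tot := |seq1.getD s 0 - seq2.getD 0 0| + c.1
      if mdGt st.1 tot then (some tot, s, c.2) else st)
    (none, 0, 0)
  ((r.2.1 : Int), (r.2.2 : Int))

-- ===== PRECONDITION & SPEC =====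
-- Pre_ excludes only seq1 ≠ [] with seq2 = [], where A raises IndexError (seq2[0]); B raises there too.
def Pre_ld_int (seq1 : List Int) (seq2 : List Int) : Prop := seq1 = [] ∨ seq2 ≠ []
instance (seq1 : List Int) (seq2 : List Int) : Decidable (Pre_ld_int seq1 seq2) := by unfold Pre_ld_int; infer_instance
def pvWitness_ld_int : List Int × List Int := ([1, 2], [3])

def Spec_ld_int (seq1 : List Int) (seq2 : List Int) (out : Int × Int) : Prop := out = ld_int_alt seq1 seq2
instance (seq1 : List Int) (seq2 : List Int) (out : Int × Int) : Decidable (Spec_ld_int seq1 seq2 out) := by unfold Spec_ld_int; infer_instance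

-- ===== CLAIM (what is proved, stated in full; the proofs are below) =====
def Claim_equal_ld_int : Prop := ∀ (seq1 : List Int) (seq2 : List Int), Dom_ld_int seq1 seq2 → Pre_ld_int seq1 seq2 → Spec_ld_int seq1 seq2 (ld_int seq1 seq2)

-- ===== LEMMAS AND PROOFS =====

-- reference value of the greedy walk from state (idx, i): (sum of future distances, final idx)
def walkF (seq1 seq2 : List Int) : Nat → Nat → Nat → Int × Nat
  | 0, idx, _ => (0, idx)
  | f+1, idx, i =>
    let r := getNextDist idx i seq1 seq2
    if r.1 < 0 then (0, idx)
    else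
      let w := walkF seq1 seq2 f r.2.1 r.2.2
      (r.1 + w.1, w.2)

def walkV (seq1 seq2 : List Int) (idx i : Nat) : Int × Nat :=
  walkF seq1 seq2 (seq1.length + seq2.length) idx i

theorem walkF_succ (seq1 seq2 : List Int) (f idx i : Nat) :
    walkF seq1 seq2 (f+1) idx i =
      (if (getNextDist idx i seq1 seq2).1 < 0 then ((0 : Int), idx)
       else ((getNextDist idx i seq1 seq2).1 +
              (walkF seq1 seq2 f (getNextDist idx i seq1 seq2).2.1 (getNextDist idx i seq1 seq2).2.2).1,
             (walkF seq1 seq2 f (getNextDist idx i seq1 seq2).2.1 (getNextDist idx i seq1 seq2).2.2).2)) := rfl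

theorem step_terminal (idx i : Nat) (seq1 seq2 : List Int) (h : i = seq2.length - 1) :
    getNextDist idx i seq1 seq2 = (-1, idx, i) := by
  simp [getNextDist, h]

theorem step_props (idx i : Nat) (seq1 seq2 : List Int)
    (hi : i < seq2.length) (hidx : idx < seq1.length) (ht : i ≠ seq2.length - 1) :
    0 ≤ (getNextDist idx i seq1 seq2).1 ∧
    (getNextDist idx i seq1 seq2).2.1 < seq1.length ∧
    (getNextDist idx i seq1 seq2).2.2 < seq2.length ∧
    (seq1.length - 1 - (getNextDist idx i seq1 seq2).2.1) +
      (seq2.length - 1 - (getNextDist idx i seq1 seq2).2.2) + 1 ≤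
    (seq1.length - 1 - idx) + (seq2.length - 1 - i) := by
  simp only [getNextDist, if_neg ht]
  by_cases h2 : idx = seq1.length - 1
  · simp only [if_pos h2]
    exact ⟨abs_nonneg _, by omega, by omega, by omega⟩
  · simp only [if_neg h2]
    by_cases hba : |seq1.getD idx 0 - seq2.getD (i+1) 0| < |seq1.getD (idx+1) 0 - seq2.getD (i+1) 0|
    · simp only [if_pos hba]
      by_cases hc : |seq1.getD (idx+1) 0 - seq2.getD i 0| < |seq1.getD idx 0 - seq2.getD (i+1) 0|
      · simp only [if_pos hc]
        norm_num
        all_goals omega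
      · simp only [if_neg hc]
        norm_num
        all_goals omega
    · simp only [if_neg hba]
      by_cases hc : |seq1.getD (idx+1) 0 - seq2.getD i 0| < |seq1.getD (idx+1) 0 - seq2.getD (i+1) 0|
      · simp only [if_pos hc]
        norm_num
        all_goals omega
      · simp only [if_neg hc]
        norm_num
        all_goals omega

theorem walkF_nonneg (seq1 seq2 : List Int) : ∀ f idx i, 0 ≤ (walkF seq1 seq2 f idx i).1 := by
  intro f
  induction f with
  | zero => intro idx i; simp [walkF]
  | succ f ih =>
    intro idx i
    simp only [walkF]
    split
    · simp
    · rename_i h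
      have := ih (getNextDist idx i seq1 seq2).2.1 (getNextDist idx i seq1 seq2).2.2
      simp only
      omega

theorem walk_fuel (seq1 seq2 : List Int) :
    ∀ f g idx i, idx < seq1.length → i < seq2.length →
    (seq1.length - 1 - idx) + (seq2.length - 1 - i) ≤ f →
    (seq1.length - 1 - idx) + (seq2.length - 1 - i) ≤ g →
    walkF seq1 seq2 (f+1) idx i = walkF seq1 seq2 (g+1) idx i := by
  intro f
  induction f with
  | zero =>
    intro g idx i hidx hi hf hg
    have ht : i = seq2.length - 1 := by omega
    rw [walkF_succ seq1 seq2 0, walkF_succ seq1 seq2 g, step_terminal idx i seq1 seq2 ht]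
    norm_num
  | succ f ih =>
    intro g idx i hidx hi hf hg
    by_cases ht : i = seq2.length - 1
    · rw [walkF_succ seq1 seq2 (f+1), walkF_succ seq1 seq2 g, step_terminal idx i seq1 seq2 ht]
      norm_num
    · obtain ⟨hnd, hidx', hi', hmeas⟩ := step_props idx i seq1 seq2 hi hidx ht
      obtain ⟨g', rfl⟩ : ∃ g', g = g' + 1 := ⟨g - 1, by omega⟩
      have heq := ih g' (getNextDist idx i seq1 seq2).2.1 (getNextDist idx i seq1 seq2).2.2
        hidx' hi' (by omega) (by omega)
      rw [walkF_succ seq1 seq2 (f+1), walkF_succ seq1 seq2 (g'+1), heq]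

theorem walkV_unfold (seq1 seq2 : List Int) (idx i : Nat)
    (hidx : idx < seq1.length) (hi : i < seq2.length) :
    walkV seq1 seq2 idx i =
      (if (getNextDist idx i seq1 seq2).1 < 0 then ((0 : Int), idx)
       else ((getNextDist idx i seq1 seq2).1 +
              (walkV seq1 seq2 (getNextDist idx i seq1 seq2).2.1 (getNextDist idx i seq1 seq2).2.2).1,
             (walkV seq1 seq2 (getNextDist idx i seq1 seq2).2.1 (getNextDist idx i seq1 seq2).2.2).2)) := by
  obtain ⟨N, hN⟩ : ∃ N, seq1.length + seq2.length = N + 1 := ⟨seq1.length + seq2.length - 1, by omega⟩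
  have hstep : walkV seq1 seq2 idx i =
      (if (getNextDist idx i seq1 seq2).1 < 0 then ((0 : Int), idx)
       else ((getNextDist idx i seq1 seq2).1 +
              (walkF seq1 seq2 N (getNextDist idx i seq1 seq2).2.1 (getNextDist idx i seq1 seq2).2.2).1,
             (walkF seq1 seq2 N (getNextDist idx i seq1 seq2).2.1 (getNextDist idx i seq1 seq2).2.2).2)) := by
    unfold walkV
    rw [hN]
    simp only [walkF]
  rw [hstep]
  by_cases hnd : (getNextDist idx i seq1 seq2).1 < 0
  · rw [if_pos hnd, if_pos hnd]
  · rw [if_neg hnd, if_neg hnd]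
    have ht : i ≠ seq2.length - 1 := by
      intro h
      rw [step_terminal idx i seq1 seq2 h] at hnd
      simp at hnd
    obtain ⟨hnd0, hidx', hi', hmeas⟩ := step_props idx i seq1 seq2 hi hidx ht
    have hw : walkF seq1 seq2 N (getNextDist idx i seq1 seq2).2.1 (getNextDist idx i seq1 seq2).2.2
        = walkV seq1 seq2 (getNextDist idx i seq1 seq2).2.1 (getNextDist idx i seq1 seq2).2.2 := by
      obtain ⟨N', hN'⟩ : ∃ N', N = N' + 1 := ⟨N - 1, by omega⟩
      unfold walkV
      rw [hN, hN']
      exact walk_fuel seq1 seq2 N' (N'+1)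
        (getNextDist idx i seq1 seq2).2.1 (getNextDist idx i seq1 seq2).2.2
        hidx' hi' (by omega) (by omega)
    rw [hw]

theorem calcGo_neg (seq1 seq2 : List Int) (md : Option Int) :
    ∀ f tot idx i, calcGo seq1 seq2 md f tot (-1) idx i = (tot, idx) := by
  intro f tot idx i
  cases f <;> simp [calcGo]

-- projection facts about the reference walk
theorem walkV_term (seq1 seq2 : List Int) (idx i : Nat)
    (hidx : idx < seq1.length) (hi : i < seq2.length) (ht : i = seq2.length - 1) :
    walkV seq1 seq2 idx i = (0, idx) := by
  rw [walkV_unfold seq1 seq2 idx i hidx hi, step_terminal idx i seq1 seq2 ht]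
  norm_num

theorem walkV_step (seq1 seq2 : List Int) (idx i : Nat)
    (hidx : idx < seq1.length) (hi : i < seq2.length) (ht : i ≠ seq2.length - 1) :
    (walkV seq1 seq2 idx i).1 = (getNextDist idx i seq1 seq2).1 +
      (walkV seq1 seq2 (getNextDist idx i seq1 seq2).2.1 (getNextDist idx i seq1 seq2).2.2).1 ∧
    (walkV seq1 seq2 idx i).2 =
      (walkV seq1 seq2 (getNextDist idx i seq1 seq2).2.1 (getNextDist idx i seq1 seq2).2.2).2 := by
  have hnd0 := (step_props idx i seq1 seq2 hi hidx ht).1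
  rw [walkV_unfold seq1 seq2 idx i hidx hi, if_neg (not_lt.mpr hnd0)]
  exact ⟨rfl, rfl⟩

-- characterisation of A's (pruned) while loop against the reference walk
theorem go_walk_none (seq1 seq2 : List Int) :
    ∀ f tot nd idx i, idx < seq1.length → i < seq2.length → 0 ≤ nd →
    (seq1.length - 1 - idx) + (seq2.length - 1 - i) + 1 ≤ f →
    calcGo seq1 seq2 none f tot nd idx i
      = (tot + nd + (walkV seq1 seq2 idx i).1, (walkV seq1 seq2 idx i).2) := by
  intro f
  induction f with
  | zero => intro tot nd idx i hidx hi hnd hf; omega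
  | succ f ih =>
    intro tot nd idx i hidx hi hnd hf
    have hstep : calcGo seq1 seq2 none (f+1) tot nd idx i =
        (if nd < 0 then (tot, idx) else
          if mdLt none (tot+nd) then (tot+nd, (getNextDist idx i seq1 seq2).2.1)
          else calcGo seq1 seq2 none f (tot+nd) (getNextDist idx i seq1 seq2).1
            (getNextDist idx i seq1 seq2).2.1 (getNextDist idx i seq1 seq2).2.2) := rfl
    rw [hstep, if_neg (not_lt.mpr hnd)]
    have hmd : mdLt none (tot+nd) = false := rfl
    rw [hmd]
    simp only [Bool.false_eq_true, if_false]
    by_cases ht : i = seq2.length - 1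
    · have hS := step_terminal idx i seq1 seq2 ht
      have hS1 : (getNextDist idx i seq1 seq2).1 = -1 := by rw [hS]
      have hS21 : (getNextDist idx i seq1 seq2).2.1 = idx := by rw [hS]
      have hS22 : (getNextDist idx i seq1 seq2).2.2 = i := by rw [hS]
      have hV1 : (walkV seq1 seq2 idx i).1 = 0 := by rw [walkV_term seq1 seq2 idx i hidx hi ht]
      have hV2 : (walkV seq1 seq2 idx i).2 = idx := by rw [walkV_term seq1 seq2 idx i hidx hi ht]
      rw [hS1, hS21, hS22, calcGo_neg, hV1, hV2]
      norm_num
    · obtain ⟨hnd0, hidx', hi', hmeas⟩ := step_props idx i seq1 seq2 hi hidx ht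
      obtain ⟨hW1, hW2⟩ := walkV_step seq1 seq2 idx i hidx hi ht
      rw [ih (tot+nd) _ _ _ hidx' hi' hnd0 (by omega), hW1, hW2]
      simp only [Prod.mk.injEq, and_true]
      ring

theorem go_walk_some (seq1 seq2 : List Int) (v : Int) :
    ∀ f tot nd idx i, idx < seq1.length → i < seq2.length → 0 ≤ nd →
    (seq1.length - 1 - idx) + (seq2.length - 1 - i) + 1 ≤ f →
    (tot + nd + (walkV seq1 seq2 idx i).1 < v →
       calcGo seq1 seq2 (some v) f tot nd idx i
         = (tot + nd + (walkV seq1 seq2 idx i).1, (walkV seq1 seq2 idx i).2))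
    ∧ (v ≤ tot + nd + (walkV seq1 seq2 idx i).1 →
       v ≤ (calcGo seq1 seq2 (some v) f tot nd idx i).1) := by
  intro f
  induction f with
  | zero => intro tot nd idx i hidx hi hnd hf; omega
  | succ f ih =>
    intro tot nd idx i hidx hi hnd hf
    have hstep : calcGo seq1 seq2 (some v) (f+1) tot nd idx i =
        (if nd < 0 then (tot, idx) else
          if mdLt (some v) (tot+nd) then (tot+nd, (getNextDist idx i seq1 seq2).2.1)
          else calcGo seq1 seq2 (some v) f (tot+nd) (getNextDist idx i seq1 seq2).1
            (getNextDist idx i seq1 seq2).2.1 (getNextDist idx i seq1 seq2).2.2) := rfl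
    rw [hstep, if_neg (not_lt.mpr hnd)]
    by_cases ht : i = seq2.length - 1
    · have hS := step_terminal idx i seq1 seq2 ht
      have hS1 : (getNextDist idx i seq1 seq2).1 = -1 := by rw [hS]
      have hS21 : (getNextDist idx i seq1 seq2).2.1 = idx := by rw [hS]
      have hV1 : (walkV seq1 seq2 idx i).1 = 0 := by rw [walkV_term seq1 seq2 idx i hidx hi ht]
      have hV2 : (walkV seq1 seq2 idx i).2 = idx := by rw [walkV_term seq1 seq2 idx i hidx hi ht]
      rw [hS1, hS21, hV1, hV2, calcGo_neg, ite_self]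
      constructor
      · intro hlt
        norm_num
      · intro hge
        show v ≤ tot + nd
        omega
    · obtain ⟨hnd0, hidx', hi', hmeas⟩ := step_props idx i seq1 seq2 hi hidx ht
      obtain ⟨hW1, hW2⟩ := walkV_step seq1 seq2 idx i hidx hi ht
      have hwnn : 0 ≤ (walkV seq1 seq2 (getNextDist idx i seq1 seq2).2.1
          (getNextDist idx i seq1 seq2).2.2).1 := walkF_nonneg seq1 seq2 _ _ _
      have IH := ih (tot+nd) (getNextDist idx i seq1 seq2).1 (getNextDist idx i seq1 seq2).2.1
        (getNextDist idx i seq1 seq2).2.2 hidx' hi' hnd0 (by omega)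
      rw [hW1, hW2]
      constructor
      · intro hlt
        rw [if_neg (show ¬ (mdLt (some v) (tot+nd) = true) by simp only [mdLt, decide_eq_true_eq]; omega),
          IH.1 (by omega)]
        simp only [Prod.mk.injEq, and_true]
        ring
      · intro hge
        by_cases hp : v < tot + nd
        · rw [if_pos (show mdLt (some v) (tot+nd) = true by simp only [mdLt, decide_eq_true_eq]; omega)]
          show v ≤ tot + nd
          omega
        · rw [if_neg (show ¬ (mdLt (some v) (tot+nd) = true) by simp only [mdLt, decide_eq_true_eq]; omega)]
          exact IH.2 (by omega)

-- ===== B-side table correctness =====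

theorem getD_map_range (n j : Nat) (f : Nat → Int × Nat) (hj : j < n) :
    (((List.range n).map f).getD j (0, 0)) = f j := by
  rw [List.getD_eq_getElem?_getD]
  simp [hj]

theorem step_caseA (seq1 seq2 : List Int) (k i : Nat)
    (ht : i ≠ seq2.length - 1) (hkn : k ≠ seq1.length - 1)
    (h1 : |seq1.getD (k+1) 0 - seq2.getD (i+1) 0| ≤ |seq1.getD k 0 - seq2.getD (i+1) 0| ∧ |seq1.getD (k+1) 0 - seq2.getD (i+1) 0| ≤ |seq1.getD (k+1) 0 - seq2.getD i 0|) :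
    getNextDist k i seq1 seq2 = (|seq1.getD (k+1) 0 - seq2.getD (i+1) 0|, k+1, i+1) := by
  simp only [getNextDist, if_neg ht, if_neg hkn]
  rw [if_neg (not_lt.mpr h1.1)]
  dsimp only
  rw [if_neg (not_lt.mpr h1.2)]
  dsimp only
  rw [if_pos rfl]

theorem step_caseB (seq1 seq2 : List Int) (k i : Nat)
    (ht : i ≠ seq2.length - 1) (hkn : k ≠ seq1.length - 1)
    (hba : |seq1.getD k 0 - seq2.getD (i+1) 0| < |seq1.getD (k+1) 0 - seq2.getD (i+1) 0|) (hbc : |seq1.getD k 0 - seq2.getD (i+1) 0| ≤ |seq1.getD (k+1) 0 - seq2.getD i 0|) :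
    getNextDist k i seq1 seq2 = (|seq1.getD k 0 - seq2.getD (i+1) 0|, k, i+1) := by
  simp only [getNextDist, if_neg ht, if_neg hkn]
  rw [if_pos hba]
  dsimp only
  rw [if_neg (not_lt.mpr hbc)]
  dsimp only
  rw [if_neg (by decide : ¬ ((1:Nat) = 0)), if_pos rfl]

theorem step_caseC (seq1 seq2 : List Int) (k i : Nat)
    (ht : i ≠ seq2.length - 1) (hkn : k ≠ seq1.length - 1)
    (h1 : ¬ (|seq1.getD (k+1) 0 - seq2.getD (i+1) 0| ≤ |seq1.getD k 0 - seq2.getD (i+1) 0| ∧ |seq1.getD (k+1) 0 - seq2.getD (i+1) 0| ≤ |seq1.getD (k+1) 0 - seq2.getD i 0|)) (h2 : ¬ (|seq1.getD k 0 - seq2.getD (i+1) 0| < |seq1.getD (k+1) 0 - seq2.getD (i+1) 0| ∧ |seq1.getD k 0 - seq2.getD (i+1) 0| ≤ |seq1.getD (k+1) 0 - seq2.getD i 0|)) :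
    getNextDist k i seq1 seq2 = (|seq1.getD (k+1) 0 - seq2.getD i 0|, k+1, i) := by
  simp only [getNextDist, if_neg ht, if_neg hkn]
  by_cases hba : |seq1.getD k 0 - seq2.getD (i+1) 0| < |seq1.getD (k+1) 0 - seq2.getD (i+1) 0|
  · have hcb : |seq1.getD (k+1) 0 - seq2.getD i 0| < |seq1.getD k 0 - seq2.getD (i+1) 0| := by omega
    rw [if_pos hba]
    dsimp only
    rw [if_pos hcb]
    dsimp only
    rw [if_neg (by decide : ¬ ((2:Nat) = 0)), if_neg (by decide : ¬ ((2:Nat) = 1))]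
  · have hca : |seq1.getD (k+1) 0 - seq2.getD i 0| < |seq1.getD (k+1) 0 - seq2.getD (i+1) 0| := by omega
    rw [if_neg hba]
    dsimp only
    rw [if_pos hca]
    dsimp only
    rw [if_neg (by decide : ¬ ((2:Nat) = 0)), if_neg (by decide : ¬ ((2:Nat) = 1))]

theorem cell_correct (seq1 seq2 : List Int) (prev acc : List (Int × Nat)) (i k : Nat)
    (hi : i < seq2.length) (hk : k < seq1.length)
    (hprev : i ≠ seq2.length - 1 → ∀ j, j < seq1.length → prev.getD j (0, 0) = walkV seq1 seq2 j (i+1))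
    (hacc : k ≠ seq1.length - 1 → acc.headD (0, 0) = walkV seq1 seq2 (k+1) i) :
    altCell seq1 seq2 prev acc i k = walkV seq1 seq2 k i := by
  unfold altCell
  by_cases ht : i = seq2.length - 1
  · rw [if_pos ht, walkV_term seq1 seq2 k i hk hi ht]
  · rw [if_neg ht]
    obtain ⟨hW1, hW2⟩ := walkV_step seq1 seq2 k i hk hi ht
    by_cases hkn : k = seq1.length - 1
    · rw [if_pos hkn]
      have hS := step_terminal k i seq1 seq2
      have hS' : getNextDist k i seq1 seq2 = (|seq1.getD k 0 - seq2.getD (i+1) 0|, k, i+1) := by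
        simp only [getNextDist, if_neg ht, if_pos hkn]
      have hS1 : (getNextDist k i seq1 seq2).1 = |seq1.getD k 0 - seq2.getD (i+1) 0| := by rw [hS']
      have hS21 : (getNextDist k i seq1 seq2).2.1 = k := by rw [hS']
      have hS22 : (getNextDist k i seq1 seq2).2.2 = i+1 := by rw [hS']
      rw [Prod.ext_iff, hW1, hW2, hS1, hS21, hS22, hprev ht k hk]
      exact ⟨rfl, rfl⟩
    · rw [if_neg hkn]
      have hk1 : k + 1 < seq1.length := by omega
      by_cases h1 : |seq1.getD (k+1) 0 - seq2.getD (i+1) 0| ≤ |seq1.getD k 0 - seq2.getD (i+1) 0| ∧ |seq1.getD (k+1) 0 - seq2.getD (i+1) 0| ≤ |seq1.getD (k+1) 0 - seq2.getD i 0|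
      · rw [if_pos h1]
        have hS' := step_caseA seq1 seq2 k i ht hkn h1
        have hS1 : (getNextDist k i seq1 seq2).1 = |seq1.getD (k+1) 0 - seq2.getD (i+1) 0| := by rw [hS']
        have hS21 : (getNextDist k i seq1 seq2).2.1 = k+1 := by rw [hS']
        have hS22 : (getNextDist k i seq1 seq2).2.2 = i+1 := by rw [hS']
        rw [Prod.ext_iff, hW1, hW2, hS1, hS21, hS22, hprev ht (k+1) hk1]
        exact ⟨rfl, rfl⟩
      · rw [if_neg h1]
        by_cases h2 : |seq1.getD k 0 - seq2.getD (i+1) 0| < |seq1.getD (k+1) 0 - seq2.getD (i+1) 0| ∧ |seq1.getD k 0 - seq2.getD (i+1) 0| ≤ |seq1.getD (k+1) 0 - seq2.getD i 0|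
        · rw [if_pos h2]
          have hS' := step_caseB seq1 seq2 k i ht hkn h2.1 h2.2
          have hS1 : (getNextDist k i seq1 seq2).1 = |seq1.getD k 0 - seq2.getD (i+1) 0| := by rw [hS']
          have hS21 : (getNextDist k i seq1 seq2).2.1 = k := by rw [hS']
          have hS22 : (getNextDist k i seq1 seq2).2.2 = i+1 := by rw [hS']
          rw [Prod.ext_iff, hW1, hW2, hS1, hS21, hS22, hprev ht k hk]
          exact ⟨rfl, rfl⟩
        · rw [if_neg h2]
          have hS' := step_caseC seq1 seq2 k i ht hkn h1 h2
          have hS1 : (getNextDist k i seq1 seq2).1 = |seq1.getD (k+1) 0 - seq2.getD i 0| := by rw [hS']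
          have hS21 : (getNextDist k i seq1 seq2).2.1 = k+1 := by rw [hS']
          have hS22 : (getNextDist k i seq1 seq2).2.2 = i := by rw [hS']
          rw [Prod.ext_iff, hW1, hW2, hS1, hS21, hS22, hacc hkn]
          exact ⟨rfl, rfl⟩

theorem rowAux (seq1 seq2 : List Int) (prev : List (Int × Nat)) (i : Nat)
    (hi : i < seq2.length)
    (hprev : i ≠ seq2.length - 1 → ∀ j, j < seq1.length → prev.getD j (0, 0) = walkV seq1 seq2 j (i+1)) :
    ∀ t, t ≤ seq1.length →
    ((List.range t).reverse).foldl (fun acc k => altCell seq1 seq2 prev acc i k :: acc)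
        ((List.range' t (seq1.length - t)).map (fun j => walkV seq1 seq2 j i))
      = (List.range' 0 seq1.length).map (fun j => walkV seq1 seq2 j i) := by
  intro t
  induction t with
  | zero =>
    intro _
    simp
  | succ t ih =>
    intro h
    rw [List.range_succ, List.reverse_append]
    simp only [List.reverse_cons, List.reverse_nil, List.nil_append, List.cons_append,
      List.foldl_cons]
    have hcell : altCell seq1 seq2 prev
        ((List.range' (t+1) (seq1.length - (t+1))).map (fun j => walkV seq1 seq2 j i)) i t
        = walkV seq1 seq2 t i := by
      apply cell_correct seq1 seq2 prev _ i t hi (by omega) hprev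
      intro htn
      have hlen : seq1.length - (t+1) = (seq1.length - (t+2)) + 1 := by omega
      rw [hlen, List.range'_succ]
      simp
    rw [hcell]
    have hr : walkV seq1 seq2 t i ::
        (List.range' (t+1) (seq1.length - (t+1))).map (fun j => walkV seq1 seq2 j i)
        = (List.range' t (seq1.length - t)).map (fun j => walkV seq1 seq2 j i) := by
      have hlen : seq1.length - t = (seq1.length - (t+1)) + 1 := by omega
      rw [hlen, List.range'_succ]
      simp
    rw [hr]
    exact ih (by omega)

theorem row_correct (seq1 seq2 : List Int) (prev : List (Int × Nat)) (i : Nat)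
    (hi : i < seq2.length)
    (hprev : i ≠ seq2.length - 1 → ∀ j, j < seq1.length → prev.getD j (0, 0) = walkV seq1 seq2 j (i+1)) :
    altRow seq1 seq2 prev i = (List.range seq1.length).map (fun j => walkV seq1 seq2 j i) := by
  have h := rowAux seq1 seq2 prev i hi hprev seq1.length le_rfl
  simp only [Nat.sub_self, List.range'_zero, List.map_nil] at h
  unfold altRow
  rw [h, List.range_eq_range']

theorem rows_correct (seq1 seq2 : List Int) :
    ∀ t, t ≤ seq2.length → ∀ prev,
    (t < seq2.length → ∀ j, j < seq1.length → prev.getD j (0, 0) = walkV seq1 seq2 j t) →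
    0 < seq2.length → ∀ j, j < seq1.length →
    (((List.range t).reverse).foldl (fun p i => altRow seq1 seq2 p i) prev).getD j (0, 0)
      = walkV seq1 seq2 j 0 := by
  intro t
  induction t with
  | zero =>
    intro _ prev hprev hm j hj
    simp only [List.range_zero, List.reverse_nil, List.foldl_nil]
    exact hprev hm j hj
  | succ t ih =>
    intro h prev hprev hm j hj
    rw [List.range_succ, List.reverse_append]
    simp only [List.reverse_cons, List.reverse_nil, List.nil_append, List.cons_append,
      List.foldl_cons]
    apply ih (by omega) _ _ hm j hj
    intro htm j' hj'
    rw [row_correct seq1 seq2 prev t (by omega) _]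
    · exact getD_map_range seq1.length j' _ hj'
    · intro htn
      exact hprev (by omega) 


-- ===== assembling the two selection loops =====

theorem main_loops (seq1 seq2 : List Int) (hm : seq2 ≠ []) :
    ld_int seq1 seq2 = ld_int_alt seq1 seq2 := by
  have hm' : 0 < seq2.length := List.length_pos_of_ne_nil hm
  have hrow : ∀ j, j < seq1.length →
      ((((List.range seq2.length).reverse).foldl (fun p i => altRow seq1 seq2 p i) []).getD j (0, 0))
        = walkV seq1 seq2 j 0 := by
    intro j hj
    exact rows_correct seq1 seq2 seq2.length le_rfl [] (fun h => absurd h (lt_irrefl _)) hm' j hj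
  have key : (List.range seq1.length).foldl (fun (st : Option Int × Nat × Nat) s =>
        let c := calcMinDist s seq1 seq2 st.1
        if mdGt st.1 c.1 then (some c.1, s, c.2) else st) (none, 0, 0)
      = (List.range seq1.length).foldl (fun (st : Option Int × Nat × Nat) s =>
        let c := (((List.range seq2.length).reverse).foldl
          (fun p i => altRow seq1 seq2 p i) []).getD s (0, 0)
        let tot := |seq1.getD s 0 - seq2.getD 0 0| + c.1
        if mdGt st.1 tot then (some tot, s, c.2) else st) (none, 0, 0) := by
    apply PySem.List.foldl_congr_mem
    intro st x hx
    have hxn : x < seq1.length := List.mem_range.mp hx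
    show (if mdGt st.1 (calcMinDist x seq1 seq2 st.1).1
            then (some (calcMinDist x seq1 seq2 st.1).1, x, (calcMinDist x seq1 seq2 st.1).2) else st)
        = _
    rw [hrow x hxn]
    unfold calcMinDist
    have hnd0 : 0 ≤ |seq1.getD x 0 - seq2.getD 0 0| := abs_nonneg _
    have hfuel : (seq1.length - 1 - x) + (seq2.length - 1 - 0) + 1 ≤
        seq1.length + seq2.length + 2 := by omega
    cases hst : st.1 with
    | none =>
      rw [go_walk_none seq1 seq2 _ 0 _ x 0 hxn hm' hnd0 hfuel]
      show (if mdGt none (0 + |seq1.getD x 0 - seq2.getD 0 0| + (walkV seq1 seq2 x 0).1) = true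
              then _ else st) = (if mdGt none (|seq1.getD x 0 - seq2.getD 0 0| + (walkV seq1 seq2 x 0).1) = true
              then _ else st)
      rw [if_pos (show mdGt none _ = true from rfl), if_pos (show mdGt none _ = true from rfl)]
      simp only [Prod.mk.injEq, Option.some.injEq, and_true]
      ring
    | some v =>
      have H := go_walk_some seq1 seq2 v _ 0 _ x 0 hxn hm' hnd0 hfuel
      have hwnn : 0 ≤ (walkV seq1 seq2 x 0).1 := walkF_nonneg seq1 seq2 _ _ _
      by_cases hlt : 0 + |seq1.getD x 0 - seq2.getD 0 0| + (walkV seq1 seq2 x 0).1 < v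
      · rw [H.1 hlt]
        rw [if_pos (show mdGt (some v) (0 + |seq1.getD x 0 - seq2.getD 0 0| + (walkV seq1 seq2 x 0).1) = true
              by simp only [mdGt, decide_eq_true_eq]; omega),
            if_pos (show mdGt (some v) (|seq1.getD x 0 - seq2.getD 0 0| + (walkV seq1 seq2 x 0).1) = true
              by simp only [mdGt, decide_eq_true_eq]; omega)]
        simp only [Prod.mk.injEq, Option.some.injEq, and_true]
        ring
      · have hge := H.2 (by omega)
        rw [if_neg (show ¬ (mdGt (some v) (calcGo seq1 seq2 (some v) (seq1.length + seq2.length + 2) 0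
              (|seq1.getD x 0 - seq2.getD 0 0|) x 0).1 = true) by simp only [mdGt, decide_eq_true_eq]; omega),
            if_neg (show ¬ (mdGt (some v) (|seq1.getD x 0 - seq2.getD 0 0| + (walkV seq1 seq2 x 0).1) = true)
              by simp only [mdGt, decide_eq_true_eq]; omega)]
  unfold ld_int ld_int_alt
  rw [key]

theorem ld_int_nil (seq2 : List Int) : ld_int [] seq2 = ld_int_alt [] seq2 := by
  simp [ld_int, ld_int_alt]

-- ===== VERDICT (by name: the statement is the Claim_ definition above) =====
theorem ld_int_spec : Claim_equal_ld_int := by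
  intro seq1 seq2 _ hpre
  unfold Spec_ld_int
  rcases hpre with h | h
  · subst h; exact ld_int_nil seq2
  · exact main_loops seq1 seq2 h
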